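-- pv_equiv track=rewrite | github.com/jborlik/AdventOfCode2020 | day14.py | createMasks
-- ===== SOURCE A (Python) =====
-- def createMasks(sMask):
--     setmask = 0
--     clearmask = 0
--     for iChr, aChr in enumerate(sMask[::-1]):
--         if aChr=='1':
--             setmask = setmask | (1 << iChr)
--         elif aChr=='0':
--             clearmask = clearmask | (1 << iChr)
--     return setmask, clearmask
-- ===== SOURCE B (Python) =====
-- def createMasks(sMask):
--     setmask = 0
--     clearmask = 0
--     for aChr in sMask:
--         setmask = setmask * 2 + (1 if aChr == '1' else 0)
--         clearmask = clearmask * 2 + (1 if aChr == '0' else 0)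
--     return setmask, clearmask
-- ===== Notes on version B (the rewrite author's own statement) =====
-- stated objective: simpler
-- what changed: Replaces the reversed-enumerate bit-shift/OR accumulation with a single forward Horner pass (mask = mask*2 + bit), eliminating the string reversal, the index bookkeeping and all bitwise operations.
import Mathlib
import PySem

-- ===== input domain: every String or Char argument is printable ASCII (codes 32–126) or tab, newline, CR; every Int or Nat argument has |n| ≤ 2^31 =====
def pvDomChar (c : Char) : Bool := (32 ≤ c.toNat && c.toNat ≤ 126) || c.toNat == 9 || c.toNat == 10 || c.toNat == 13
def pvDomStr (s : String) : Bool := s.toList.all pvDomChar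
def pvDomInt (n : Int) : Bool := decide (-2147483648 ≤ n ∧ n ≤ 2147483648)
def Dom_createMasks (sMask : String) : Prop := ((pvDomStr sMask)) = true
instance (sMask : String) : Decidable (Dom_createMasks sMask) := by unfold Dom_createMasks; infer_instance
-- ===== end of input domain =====

-- B replaces A's reversed-enumerate bit-shift/OR accumulation with one forward Horner pass
-- (mask = mask*2 + bit); objective: simpler (no reversal, no index bookkeeping, no bitwise ops).

-- ===== PORT A =====
-- loop body of A: if aChr=='1': setmask |= 1 << iChr; elif aChr=='0': clearmask |= 1 << iChr
-- (iChr comes from enumerate so 0 ≤ iChr; '1 << iChr' is '1 <<< iChr.toNat', exact here)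
def pvStepA (st : Int × Int) (p : Int × Char) : Int × Int :=
  if p.2 = '1' then (PySem.Int.bor st.1 ((1 : Int) <<< p.1.toNat), st.2)
  else if p.2 = '0' then (st.1, PySem.Int.bor st.2 ((1 : Int) <<< p.1.toNat))
  else st

-- sMask[::-1] is the reverse of the string (PySem.Str.slice?_none_none_neg_one), iterated as chars
def createMasks (sMask : String) : Int × Int :=
  (PySem.List.enumerate sMask.toList.reverse 0).foldl pvStepA (0, 0)

-- ===== PORT B =====
-- loop body of B: setmask = setmask*2 + (1 if c=='1' else 0); clearmask = clearmask*2 + (1 if c=='0' else 0)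
def pvStepB (st : Int × Int) (c : Char) : Int × Int :=
  (st.1 * 2 + (if c = '1' then 1 else 0), st.2 * 2 + (if c = '0' then 1 else 0))

def createMasks_alt (sMask : String) : Int × Int :=
  sMask.toList.foldl pvStepB (0, 0)

-- ===== PRECONDITION & SPEC =====
def Spec_createMasks (sMask : String) (out : Int × Int) : Prop := out = createMasks_alt sMask
instance (sMask : String) (out : Int × Int) : Decidable (Spec_createMasks sMask out) := by unfold Spec_createMasks; infer_instance

-- ===== CLAIM (what is proved, stated in full; the proofs are below) =====
def Claim_equal_createMasks : Prop := ∀ (sMask : String), Dom_createMasks sMask → Spec_createMasks sMask (createMasks sMask)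

-- ===== LEMMAS AND PROOFS =====

-- OR-ing a fresh high bit into a nonnegative value below it is addition
theorem pv_bor_high (k : Nat) (s : Int) (h0 : 0 ≤ s) (h : s < 2 ^ k) :
    PySem.Int.bor s ((1 : Int) <<< k) = s + 2 ^ k := by
  obtain ⟨m, rfl⟩ : ∃ m : Nat, s = (m : Int) := ⟨s.toNat, (Int.toNat_of_nonneg h0).symm⟩
  have hm : m < 2 ^ k := by exact_mod_cast h
  have h1 : (1 : Int) <<< k = ((2 ^ k : Nat) : Int) := by
    simp [Int.shiftLeft_eq]
  rw [h1, PySem.Int.bor_natCast]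
  have h3 := Nat.two_pow_add_eq_or_of_lt (i := k) hm 1
  simp only [mul_one] at h3
  have h2 : m ||| 2 ^ k = m + 2 ^ k := by
    rw [Nat.lor_comm]; omega
  rw [h2]; push_cast; ring

-- Horner pass from an arbitrary accumulator, in terms of the pass from (0,0)
theorem pv_hornerB (l : List Char) (st : Int × Int) :
    l.foldl pvStepB st =
      (st.1 * 2 ^ l.length + (l.foldl pvStepB (0, 0)).1,
       st.2 * 2 ^ l.length + (l.foldl pvStepB (0, 0)).2) := by
  induction l generalizing st with
  | nil => simp
  | cons c t ih =>
    simp only [List.foldl_cons, List.length_cons]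
    rw [ih (pvStepB st c), ih (pvStepB (0, 0) c)]
    simp only [pvStepB, Prod.mk.injEq]
    constructor <;> · push_cast; ring

-- both Horner accumulators stay in [0, 2^len)
theorem pv_boundsB (l : List Char) :
    0 ≤ (l.foldl pvStepB (0, 0)).1 ∧ (l.foldl pvStepB (0, 0)).1 < 2 ^ l.length ∧
    0 ≤ (l.foldl pvStepB (0, 0)).2 ∧ (l.foldl pvStepB (0, 0)).2 < 2 ^ l.length := by
  induction l with
  | nil => simp
  | cons c t ih =>
    simp only [List.foldl_cons, List.length_cons]
    rw [pv_hornerB t (pvStepB (0, 0) c)]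
    obtain ⟨h1, h2, h3, h4⟩ := ih
    simp only [pvStepB]
    have hp : (0 : Int) < 2 ^ t.length := by positivity
    constructor
    · split_ifs <;> simp <;> omega
    constructor
    · have : (2 : Int) ^ (t.length + 1) = 2 ^ t.length + 2 ^ t.length := by ring
      split_ifs <;> simp <;> omega
    constructor
    · split_ifs <;> simp <;> omega
    · have : (2 : Int) ^ (t.length + 1) = 2 ^ t.length + 2 ^ t.length := by ring
      split_ifs <;> simp <;> omega

-- A's reversed-enumerate OR fold computes B's forward Horner fold
theorem pv_main (l : List Char) :
    (PySem.List.enumerate l.reverse 0).foldl pvStepA (0, 0) = l.foldl pvStepB (0, 0) := by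
  induction l with
  | nil => simp [PySem.List.enumerate_nil]
  | cons c t ih =>
    have he : PySem.List.enumerate (t.reverse ++ [c]) 0 =
        PySem.List.enumerate t.reverse 0 ++ [((t.length : Int), c)] := by
      rw [PySem.List.enumerate_append]
      simp [PySem.List.enumerate_cons, PySem.List.enumerate_nil]
    rw [List.reverse_cons, he, List.foldl_append, ih, List.foldl_cons, List.foldl_nil,
        List.foldl_cons, pv_hornerB t (pvStepB (0, 0) c)]
    obtain ⟨h1, h2, h3, h4⟩ := pv_boundsB t
    simp only [pvStepA, pvStepB, Int.toNat_natCast]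
    by_cases hc1 : c = '1'
    · simp only [hc1, reduceIte]
      rw [pv_bor_high t.length _ h1 (by simpa using h2)]
      refine Prod.ext ?_ ?_ <;> (simp; try ring)
    · by_cases hc0 : c = '0'
      · simp only [hc0, reduceIte, if_neg (by decide : ¬('0' = '1'))]
        rw [pv_bor_high t.length _ h3 (by simpa using h4)]
        refine Prod.ext ?_ ?_ <;> (simp; try ring)
      · simp [hc0, hc1]

-- ===== VERDICT (by name: the statement is the Claim_ definition above) =====
theorem createMasks_spec : Claim_equal_createMasks := by
  intro sMask _
  unfold Spec_createMasks createMasks createMasks_alt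
  exact pv_main sMask.toList
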